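-- pv_equiv track=rewrite | github.com/goaziz/leetcode | Easy/contains_duplicate_II_219.py | containsNearbyDuplicate3
-- ===== SOURCE A (Python) =====
-- from typing import List
--
-- def containsNearbyDuplicate3(nums: List[int], k: int) -> bool:
--     # not mine
--     window = set()
--     L = 0
--     for R in range(len(nums)):
--         if R - L > k:
--             window.remove(nums[L])
--             L += 1
--         if nums[R] in window:
--             return True
--         window.add(nums[R])
--     return False
-- ===== SOURCE B (Python) =====
-- def containsNearbyDuplicate3(nums, k):
--     last = {}
--     for i, x in enumerate(nums):
--         if x in last and i - last[x] <= k: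
--             return True
--         last[x] = i
--     return False
-- ===== Notes on version B (the rewrite author's own statement) =====
-- stated objective: idiomatic
-- what changed: Replaces the sliding-window set with left pointer and per-step removal by a single dict mapping each value to its last-seen index, checked once per element.
-- outside the precondition, e.g. on containsNearbyDuplicate3([1], -1): A raises KeyError, B returns False
import Mathlib
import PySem

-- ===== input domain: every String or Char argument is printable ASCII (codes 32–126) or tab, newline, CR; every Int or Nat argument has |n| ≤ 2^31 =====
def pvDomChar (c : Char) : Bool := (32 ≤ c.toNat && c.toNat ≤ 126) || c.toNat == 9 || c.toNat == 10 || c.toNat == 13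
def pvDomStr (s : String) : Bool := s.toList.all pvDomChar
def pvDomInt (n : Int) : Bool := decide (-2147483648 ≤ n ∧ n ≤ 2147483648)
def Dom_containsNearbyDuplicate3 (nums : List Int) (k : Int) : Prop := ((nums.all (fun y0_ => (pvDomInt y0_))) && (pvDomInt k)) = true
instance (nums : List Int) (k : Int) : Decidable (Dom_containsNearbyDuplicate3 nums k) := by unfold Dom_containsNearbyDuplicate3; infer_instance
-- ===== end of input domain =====

-- B replaces A's sliding-window set (with left pointer and per-step removal) by a dict of
-- last-seen indices, checked once per element: an idiomatic alternative, same O(n) cost.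


-- ===== PORT A =====
-- A's loop 'for R in range(len(nums))' with early return, window set and left pointer L;
-- 'window.remove(nums[L])' is PySem.Set.remove?; its 'none' branch is Python's KeyError
-- (excluded by Pre_, the value returned there is never claimed).
def goA_containsNearbyDuplicate3 (nums : List Int) (k : Int) (R L : Nat) (window : PySem.Set Int) : Bool :=
  if h : R < nums.length then
    if (R : Int) - (L : Int) > k then
      match PySem.Set.remove? window (nums.getD L 0) with
      | none => false -- Python: KeyError (outside Pre_)
      | some w =>
        if PySem.Set.contains w (nums.getD R 0) then true
        else goA_containsNearbyDuplicate3 nums k (R + 1) (L + 1) (PySem.Set.add w (nums.getD R 0))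
    else
      if PySem.Set.contains window (nums.getD R 0) then true
      else goA_containsNearbyDuplicate3 nums k (R + 1) L (PySem.Set.add window (nums.getD R 0))
  else false
  termination_by nums.length - R

def containsNearbyDuplicate3 (nums : List Int) (k : Int) : Bool :=
  goA_containsNearbyDuplicate3 nums k 0 0 PySem.Set.empty

-- ===== PORT B =====
-- B's loop 'for i, x in enumerate(nums)': dict 'last' of last-seen indices.
def goB_containsNearbyDuplicate3 (k : Int) : List Int → Nat → PySem.Dict Int Int → Bool
  | [], _, _ => false
  | x :: rest, i, last =>
    match PySem.Dict.get? last x with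
    | some j =>
      if (i : Int) - j ≤ k then true
      else goB_containsNearbyDuplicate3 k rest (i + 1) (PySem.Dict.insert last x (i : Int))
    | none => goB_containsNearbyDuplicate3 k rest (i + 1) (PySem.Dict.insert last x (i : Int))

def containsNearbyDuplicate3_alt (nums : List Int) (k : Int) : Bool :=
  goB_containsNearbyDuplicate3 k nums 0 PySem.Dict.empty

-- ===== PRECONDITION & SPEC =====
-- Pre_ excludes exactly the inputs where A raises: on non-empty nums with k < 0 the first
-- iteration executes 'window.remove(nums[0])' on the empty set, a KeyError.
def Pre_containsNearbyDuplicate3 (nums : List Int) (k : Int) : Prop := nums = [] ∨ 0 ≤ k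
instance (nums : List Int) (k : Int) : Decidable (Pre_containsNearbyDuplicate3 nums k) := by unfold Pre_containsNearbyDuplicate3; infer_instance

def pvWitness_containsNearbyDuplicate3 : List Int × Int := ([1, 2, 1], 2)

def Spec_containsNearbyDuplicate3 (nums : List Int) (k : Int) (out : Bool) : Prop := out = containsNearbyDuplicate3_alt nums k
instance (nums : List Int) (k : Int) (out : Bool) : Decidable (Spec_containsNearbyDuplicate3 nums k out) := by unfold Spec_containsNearbyDuplicate3; infer_instance

-- ===== CLAIM (what is proved, stated in full; the proofs are below) =====
def Claim_equal_containsNearbyDuplicate3 : Prop := ∀ (nums : List Int) (k : Int), Dom_containsNearbyDuplicate3 nums k → Pre_containsNearbyDuplicate3 nums k → Spec_containsNearbyDuplicate3 nums k (containsNearbyDuplicate3 nums k)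

-- ===== LEMMAS AND PROOFS =====

-- The window A holds when entering iteration R: values of nums over indices [a, b).
def pvWin (nums : List Int) (a b : Nat) : List Int :=
  (List.range' a (b - a)).map (fun j => nums.getD j 0)

theorem pvMem_win {nums : List Int} {a b : Nat} {y : Int} :
    y ∈ pvWin nums a b ↔ ∃ j : Nat, a ≤ j ∧ j < b ∧ nums.getD j 0 = y := by
  simp only [pvWin, List.mem_map, List.mem_range'_1]
  constructor
  · rintro ⟨j, ⟨h1, h2⟩, rfl⟩; exact ⟨j, h1, by omega, rfl⟩
  · rintro ⟨j, h1, h2, rfl⟩; exact ⟨j, ⟨h1, by omega⟩, rfl⟩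

-- The invariant on B's dict: it maps each value to the last index < R where it occurs.
def pvLastInv (nums : List Int) (R : Nat) (last : PySem.Dict Int Int) : Prop :=
  ∀ x j, last.get? x = some j ↔
    ∃ jn : Nat, (jn : Int) = j ∧ jn < R ∧ nums.getD jn 0 = x ∧
      ∀ m : Nat, jn < m → m < R → nums.getD m 0 ≠ x

-- No near-duplicate among the first R elements.
def pvNoDup (nums : List Int) (k : Int) (R : Nat) : Prop :=
  ∀ a b : Nat, a < b → b < R → (b : Int) - (a : Int) ≤ k → nums.getD a 0 ≠ nums.getD b 0

-- Greatest occurrence below R of a value that occurs at all.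
theorem pvLastExists {nums : List Int} {R j : Nat} {x : Int}
    (hj : j < R) (hx : nums.getD j 0 = x) :
    ∃ jm : Nat, j ≤ jm ∧ jm < R ∧ nums.getD jm 0 = x ∧
      ∀ m : Nat, jm < m → m < R → nums.getD m 0 ≠ x := by
  classical
  have h1 := Nat.le_findGreatest (P := fun m => m < R ∧ nums.getD m 0 = x)
    (m := j) (n := R - 1) (by omega) ⟨hj, hx⟩
  have h2 := Nat.findGreatest_spec (P := fun m => m < R ∧ nums.getD m 0 = x)
    (m := j) (n := R - 1) (by omega) ⟨hj, hx⟩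
  refine ⟨_, h1, h2.1, h2.2, ?_⟩
  intro m hm hmR hval
  exact Nat.findGreatest_is_greatest hm (by omega) ⟨hmR, hval⟩

-- Invariant steps for B's dict and for near-duplicate-freedom.
theorem pvInv_step {nums : List Int} {R : Nat} {last : PySem.Dict Int Int} {x : Int}
    (hinv : pvLastInv nums R last) (hx : nums.getD R 0 = x) :
    pvLastInv nums (R + 1) (PySem.Dict.insert last x (R : Int)) := by
  intro y j'
  rw [PySem.Dict.get?_insert]
  by_cases hyx : y = x
  · subst hyx
    rw [if_pos rfl]
    constructor
    · rintro h; injection h with h; subst h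
      exact ⟨R, rfl, by omega, hx, fun m hm1 hm2 => by omega⟩
    · rintro ⟨jn, hj0, hj1, hj2, hj3⟩
      have hjR : jn = R := by
        by_contra hne
        exact hj3 R (by omega) (by omega) hx
      subst hjR; rw [hj0]
  · rw [if_neg hyx, hinv y j']
    constructor
    · rintro ⟨jn, hj0, hj1, hj2, hj3⟩
      refine ⟨jn, hj0, by omega, hj2, fun m hm1 hm2 hv => ?_⟩
      by_cases hmR : m = R
      · exact hyx (by rw [← hv, hmR, hx])
      · exact hj3 m hm1 (by omega) hv
    · rintro ⟨jn, hj0, hj1, hj2, hj3⟩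
      have hjnR : jn ≠ R := fun h => hyx (by rw [← hj2, h, hx])
      exact ⟨jn, hj0, by omega, hj2, fun m hm1 hm2 => hj3 m hm1 (by omega)⟩

theorem pvNoDup_step {nums : List Int} {k : Int} {R : Nat}
    (hnd : pvNoDup nums k R)
    (hnot : nums.getD R 0 ∉ pvWin nums (((R : Int) - k).toNat) R) :
    pvNoDup nums k (R + 1) := by
  intro a b hab hbR hbk
  by_cases hbR' : b = R
  · subst hbR'
    intro hval
    exact hnot (pvMem_win.mpr ⟨a, by omega, hab, hval⟩)
  · exact hnd a b hab (by omega) hbk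

theorem pvMain (nums : List Int) (k : Int) (hk : 0 ≤ k) :
    ∀ (n R : Nat) (last : PySem.Dict Int Int), nums.length - R ≤ n →
      pvLastInv nums R last → pvNoDup nums k R →
      goA_containsNearbyDuplicate3 nums k R (((R : Int) - 1 - k).toNat)
          (pvWin nums (((R : Int) - 1 - k).toNat) R)
        = goB_containsNearbyDuplicate3 k (nums.drop R) R last := by
  intro n
  induction n with
  | zero =>
    intro R last hn _ _
    have hR : nums.length ≤ R := by omega
    rw [goA_containsNearbyDuplicate3, dif_neg (by omega), List.drop_eq_nil_of_le hR]
    rfl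
  | succ n ih =>
    intro R last hn hinv hnd
    by_cases hR : R < nums.length
    · -- abbreviations: L entering the iteration, L' after the removal step
      have hdrop : nums.drop R = nums.getD R 0 :: nums.drop (R + 1) := by
        rw [List.drop_eq_getElem_cons hR, List.getD_eq_getElem nums 0 hR]
      set x := nums.getD R 0 with hx
      -- Step 1: goA's removal step leaves window = pvWin nums L' R with L' = (R - k).toNat
      have hwin : goA_containsNearbyDuplicate3 nums k R (((R : Int) - 1 - k).toNat)
            (pvWin nums (((R : Int) - 1 - k).toNat) R)
          = (if PySem.Set.contains (pvWin nums (((R : Int) - k).toNat) R) x then true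
             else goA_containsNearbyDuplicate3 nums k (R + 1) (((R : Int) - k).toNat)
               (PySem.Set.add (pvWin nums (((R : Int) - k).toNat) R) x)) := by
        rw [goA_containsNearbyDuplicate3, dif_pos hR]
        by_cases hkR : (R : Int) ≤ k
        · have h0 : ((R : Int) - 1 - k).toNat = 0 := by omega
          have h0' : ((R : Int) - k).toNat = 0 := by omega
          rw [if_neg (by omega), h0, h0']
        · -- removal fires: L = R - 1 - k ≥ 0, window loses nums[L]
          have hL : (((R : Int) - 1 - k).toNat : Int) = (R : Int) - 1 - k := by omega
          set L := ((R : Int) - 1 - k).toNat with hLdef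
          have hLR : L < R := by omega
          have hL' : ((R : Int) - k).toNat = L + 1 := by omega
          have hsplit : pvWin nums L R = nums.getD L 0 :: pvWin nums (L + 1) R := by
            have : R - L = (R - (L + 1)) + 1 := by omega
            rw [pvWin, this, List.range'_succ]
            rfl
          have hnotin : nums.getD L 0 ∉ pvWin nums (L + 1) R := by
            intro hmem
            rcases pvMem_win.mp hmem with ⟨m, hm1, hm2, hval⟩
            exact hnd L m (by omega) hm2 (by omega) hval.symm
          have hmem : nums.getD L 0 ∈ pvWin nums L R := by
            rw [hsplit]; exact List.mem_cons_self
          rw [if_pos (by omega), PySem.Set.remove?_of_mem hmem]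
          have hdisc : PySem.Set.discard (pvWin nums L R) (nums.getD L 0)
              = pvWin nums (L + 1) R := by
            rw [hsplit, PySem.Set.discard, List.filter_cons]
            rw [if_neg (by simp)]
            apply List.filter_eq_self.mpr
            intro y hy
            have hne : y ≠ nums.getD L 0 := fun h => hnotin (h ▸ hy)
            simpa [List.getD] using hne
          rw [hdisc, hL']
      rw [hwin, hdrop]
      set L' := ((R : Int) - k).toNat with hL'def
      have hL'le : (L' : Int) = max ((R : Int) - k) 0 := by omega
      -- Step 2: the two tests agree
      cases hget : last.get? x with
      | none =>
        have hnotmem : x ∉ pvWin nums L' R := by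
          intro hmem
          rcases pvMem_win.mp hmem with ⟨m, hm1, hm2, hval⟩
          rcases pvLastExists hm2 hval with ⟨jm, _, hjm2, hjm3, hjm4⟩
          have := (hinv x jm).mpr ⟨jm, rfl, hjm2, hjm3, hjm4⟩
          rw [hget] at this; cases this
        have hcf : PySem.Set.contains (pvWin nums L' R) x = false := by
          rw [← Bool.not_eq_true]
          intro hc
          exact hnotmem ((PySem.Set.contains_iff _ _).mp hc)
        rw [hcf, if_neg (by simp), goB_containsNearbyDuplicate3, hget]
        have hadd' : PySem.Set.add (pvWin nums L' R) x = pvWin nums L' (R + 1) := by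
          rw [PySem.Set.add_of_not_mem hnotmem]
          have h1 : R + 1 - L' = (R - L') + 1 := by omega
          have h2 : L' + (R - L') = R := by omega
          rw [pvWin, pvWin, h1, List.range'_1_concat, h2, List.map_append]
          rfl
        have h := ih (R + 1) (PySem.Dict.insert last x (R : Int)) (by omega)
          (pvInv_step hinv hx.symm) (pvNoDup_step hnd hnotmem)
        rw [show ((((R + 1 : Nat)) : Int) - 1 - k).toNat = ((R : Int) - k).toNat from by omega,
          ← hL'def] at h
        rw [hadd']
        exact h
      | some j =>
        rcases (hinv x j).mp hget with ⟨jn, hjn0, hjn1, hjn2, hjn3⟩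
        by_cases hle : (R : Int) - j ≤ k
        · have hmem : x ∈ pvWin nums L' R := by
            apply pvMem_win.mpr
            exact ⟨jn, by omega, hjn1, hjn2⟩
          have hct : PySem.Set.contains (pvWin nums L' R) x = true :=
            (PySem.Set.contains_iff _ _).mpr hmem
          rw [hct, if_pos rfl]
          simp only [goB_containsNearbyDuplicate3, hget]
          rw [if_pos hle]
        · have hnotmem : x ∉ pvWin nums L' R := by
            intro hmem
            rcases pvMem_win.mp hmem with ⟨m, hm1, hm2, hval⟩
            have hmjn : m ≤ jn := by
              by_contra hgt
              exact hjn3 m (by omega) hm2 hval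
            exact hle (by omega)
          have hcf : PySem.Set.contains (pvWin nums L' R) x = false := by
            rw [← Bool.not_eq_true]
            intro hc
            exact hnotmem ((PySem.Set.contains_iff _ _).mp hc)
          rw [hcf, if_neg (by simp)]
          simp only [goB_containsNearbyDuplicate3, hget]
          rw [if_neg hle]
          have hadd' : PySem.Set.add (pvWin nums L' R) x = pvWin nums L' (R + 1) := by
            rw [PySem.Set.add_of_not_mem hnotmem]
            have h1 : R + 1 - L' = (R - L') + 1 := by omega
            have h2 : L' + (R - L') = R := by omega
            rw [pvWin, pvWin, h1, List.range'_1_concat, h2, List.map_append]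
            rfl
          have h := ih (R + 1) (PySem.Dict.insert last x (R : Int)) (by omega)
            (pvInv_step hinv hx.symm) (pvNoDup_step hnd hnotmem)
          rw [show ((((R + 1 : Nat)) : Int) - 1 - k).toNat = ((R : Int) - k).toNat from by omega,
            ← hL'def] at h
          rw [hadd']
          exact h
    · have hR' : nums.length ≤ R := by omega
      rw [goA_containsNearbyDuplicate3, dif_neg hR, List.drop_eq_nil_of_le hR']
      rfl

-- ===== VERDICT (by name: the statement is the Claim_ definition above) =====
theorem containsNearbyDuplicate3_spec : Claim_equal_containsNearbyDuplicate3 := by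
  intro nums k _ hpre
  unfold Spec_containsNearbyDuplicate3 containsNearbyDuplicate3 containsNearbyDuplicate3_alt
  rcases hpre with hnil | hk
  · subst hnil
    rw [goA_containsNearbyDuplicate3, dif_neg (by simp)]
    rfl
  · have hinv : pvLastInv nums 0 PySem.Dict.empty := by
      intro x j
      rw [PySem.Dict.get?_empty]
      constructor
      · intro h; cases h
      · rintro ⟨jn, _, hj1, _⟩; exact absurd hj1 (by omega)
    have hnd : pvNoDup nums k 0 := fun a b _ hb _ => absurd hb (by omega)
    have h := pvMain nums k hk nums.length 0 PySem.Dict.empty (by omega) hinv hnd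
    rw [show ((((0 : Nat)) : Int) - 1 - k).toNat = 0 from by omega] at h
    rw [show pvWin nums 0 0 = PySem.Set.empty from rfl, List.drop_zero] at h
    exact h
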